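-- pv_equiv track=rewrite | github.com/RevEngAI/plugin-ida | reai_toolkit/app/coordinators/ai_decomp_coordinator.py | _format_summary_as_comment
-- ===== SOURCE A (Python) =====
-- def _format_summary_as_comment(summary: str) -> str:
--     prefix = " * "
--     max_comment_width: int = 100
--     content_width: int = max_comment_width - len(prefix)
--
--     lines: list[str] = ["/*"]
--
--     for paragraph in summary.split("\n"):
--         if not paragraph.strip():
--             lines.append(" *")
--             continue
--
--         words: list[str] = paragraph.split()
--         current_line: str = ""
--
--         for word in words:
--             if not current_line:
--                 current_line = word
--             elif len(current_line) + 1 + len(word) <= content_width: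
--                 current_line += " " + word
--             else:
--                 lines.append(prefix + current_line)
--                 current_line = word
--
--         if current_line:
--             lines.append(prefix + current_line)
--
--     lines.append(" */")
--     return "\n".join(lines)
-- ===== SOURCE B (Python) =====
-- def _take(cur, rest):
--     if rest and len(cur) + 1 + len(rest[0]) <= 97:
--         return _take(cur + " " + rest[0], rest[1:])
--     return cur, rest
--
--
-- def _wrap(words):
--     out = []
--     while words:
--         line, words = _take(words[0], words[1:])
--         out.append(" * " + line)
--     return out
--
--
-- def _format_summary_as_comment(summary: str) -> str:
--     body = [
--         line
--         for paragraph in summary.split("\n")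
--         for line in (_wrap(paragraph.split()) or [" *"])
--     ]
--     return "\n".join(["/*"] + body + [" */"])
-- ===== Notes on version B (the rewrite author's own statement) =====
-- stated objective: alternative
-- what changed: A threads a current_line string accumulator with an end-of-paragraph flush through one big loop; B wraps each paragraph by a greedy chunking pair (_take grabs the words of one line, _wrap emits line after line) and assembles the comment with a flat comprehension over paragraphs.
import Mathlib
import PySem

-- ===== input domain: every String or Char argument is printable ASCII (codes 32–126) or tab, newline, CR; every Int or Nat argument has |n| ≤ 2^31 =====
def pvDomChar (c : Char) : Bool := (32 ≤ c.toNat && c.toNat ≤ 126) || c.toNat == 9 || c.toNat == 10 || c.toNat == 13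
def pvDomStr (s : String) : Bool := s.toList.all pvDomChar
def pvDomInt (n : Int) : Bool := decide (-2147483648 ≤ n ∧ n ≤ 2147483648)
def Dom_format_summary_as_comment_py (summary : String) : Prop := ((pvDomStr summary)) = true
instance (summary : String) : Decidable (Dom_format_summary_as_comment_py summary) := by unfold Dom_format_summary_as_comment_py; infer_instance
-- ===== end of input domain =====

-- B replaces A's current_line accumulator-and-flush loop by a greedy chunking pair (_take/_wrap)
-- per paragraph plus a flat comprehension; same output, alternative structure (no speed claim).

-- ===== PORT A =====
-- the body of A's inner `for word in words` loop, over the state (lines, current_line)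
def pvA_step (pfx : List Char) (contentWidth : Int)
    (p : List (List Char) × List Char) (word : List Char) : List (List Char) × List Char :=
  if p.2 = [] then (p.1, word)
  else if (p.2.length : Int) + 1 + (word.length : Int) ≤ contentWidth then (p.1, p.2 ++ ' ' :: word)
  else (p.1 ++ [pfx ++ p.2], word)

def format_summary_as_comment_py (summary : String) : String :=
  let pfx : List Char := " * ".toList
  let contentWidth : Int := 100 - (pfx.length : Int)
  let lines0 : List (List Char) := ["/*".toList]
  let lines := (PySem.Chars.splitOn summary.toList ['\n']).foldl (fun lines paragraph =>
    if PySem.Chars.strip paragraph = [] then lines ++ [" *".toList]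
    else
      let st := (PySem.Chars.split₀ paragraph).foldl (pvA_step pfx contentWidth)
        (lines, ([] : List Char))
      if st.2 ≠ [] then st.1 ++ [pfx ++ st.2] else st.1) lines0
  String.ofList (PySem.Chars.join ['\n'] (lines ++ [" */".toList]))

-- ===== PORT B =====
-- Source B's _take: greedily absorb the words of `rest` that still fit on the line `cur`
def pvB_take (cur : List Char) : List (List Char) → List Char × List (List Char)
  | [] => (cur, [])
  | w :: ws =>
    if (cur.length : Int) + 1 + (w.length : Int) ≤ 97 then pvB_take (cur ++ ' ' :: w) ws
    else (cur, w :: ws)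

theorem pvB_take_rest_le (cur : List Char) (ws : List (List Char)) :
    (pvB_take cur ws).2.length ≤ ws.length := by
  induction ws generalizing cur with
  | nil => simp [pvB_take]
  | cons w ws ih =>
    simp only [pvB_take]
    split
    · exact Nat.le_succ_of_le (ih _)
    · simp

-- Source B's _wrap: emit " * "-prefixed lines while words remain
def pvB_wrap : List (List Char) → List (List Char)
  | [] => []
  | w :: ws =>
    let t := pvB_take w ws
    (" * ".toList ++ t.1) :: pvB_wrap t.2
termination_by ws => ws.length
decreasing_by
  simpa using Nat.lt_succ_of_le (pvB_take_rest_le w ws)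

def format_summary_as_comment_py_alt (summary : String) : String :=
  String.ofList (PySem.Chars.join ['\n'] ("/*".toList ::
    ((PySem.Chars.splitOn summary.toList ['\n']).flatMap (fun paragraph =>
      let wd := pvB_wrap (PySem.Chars.split₀ paragraph)
      if wd = [] then [" *".toList] else wd)) ++ [" */".toList]))

-- ===== PRECONDITION & SPEC =====
def Spec_format_summary_as_comment_py (summary : String) (out : String) : Prop := out = format_summary_as_comment_py_alt summary
instance (summary : String) (out : String) : Decidable (Spec_format_summary_as_comment_py summary out) := by unfold Spec_format_summary_as_comment_py; infer_instance

-- ===== CLAIM (what is proved, stated in full; the proofs are below) =====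
def Claim_equal_format_summary_as_comment_py : Prop := ∀ (summary : String), Dom_format_summary_as_comment_py summary → Spec_format_summary_as_comment_py summary (format_summary_as_comment_py summary)

-- ===== LEMMAS AND PROOFS =====

theorem split₀_go_ne_nil (s : List Char) (cur : List Char) (acc : List (List Char))
    (hacc : ∀ x ∈ acc, x ≠ []) : ∀ w ∈ PySem.Chars.split₀.go s cur acc, w ≠ [] := by
  induction s generalizing cur acc with
  | nil =>
    intro w hw
    simp only [PySem.Chars.split₀.go] at hw
    split at hw
    · exact hacc w (by simpa using hw)
    · rename_i hne
      rcases (by simpa using hw : w ∈ acc ∨ w = cur.reverse) with h | h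
      · exact hacc w h
      · subst h
        simpa using List.isEmpty_eq_false_iff.mp (by simpa using hne)
  | cons c rest ih =>
    intro w hw
    simp only [PySem.Chars.split₀.go] at hw
    split at hw
    · split at hw
      · exact ih [] acc hacc w hw
      · rename_i hne
        refine ih [] (cur.reverse :: acc) ?_ w hw
        intro x hx
        rcases List.mem_cons.mp hx with h | h
        · subst h
          simpa using List.isEmpty_eq_false_iff.mp (by simpa using hne)
        · exact hacc x h
    · exact ih (c :: cur) acc hacc w hw

theorem split₀_mem_ne_nil (p : List Char) : ∀ w ∈ PySem.Chars.split₀ p, w ≠ [] :=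
  split₀_go_ne_nil p [] [] (by simp)

theorem split₀_go_eq_nil_iff (s : List Char) (cur : List Char) (acc : List (List Char)) :
    PySem.Chars.split₀.go s cur acc = [] ↔
      (acc = [] ∧ cur = [] ∧ ∀ c ∈ s, PySem.Chars.isspace c) := by
  induction s generalizing cur acc with
  | nil =>
    simp only [PySem.Chars.split₀.go]
    split
    · simp_all [List.isEmpty_iff]
    · simp_all [List.isEmpty_iff]
  | cons c rest ih =>
    simp only [PySem.Chars.split₀.go]
    split
    · split
      · rw [ih]; simp_all [List.isEmpty_iff]
      · rw [ih]; simp_all [List.isEmpty_iff]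
    · rw [ih]; simp_all

theorem split₀_eq_nil_iff (p : List Char) :
    PySem.Chars.split₀ p = [] ↔ ∀ c ∈ p, PySem.Chars.isspace c := by
  rw [PySem.Chars.split₀, split₀_go_eq_nil_iff]; simp

theorem strip_eq_nil_iff (p : List Char) :
    PySem.Chars.strip p = [] ↔ ∀ c ∈ p, PySem.Chars.isspace c := by
  constructor
  · intro h
    simp only [PySem.Chars.strip, PySem.Chars.rstrip, PySem.Chars.lstrip] at h
    rw [List.reverse_eq_nil_iff, List.dropWhile_eq_nil_iff] at h
    simp only [List.mem_reverse] at h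
    have hl : List.dropWhile PySem.Chars.isspace p = [] := by
      cases hd : List.dropWhile PySem.Chars.isspace p with
      | nil => rfl
      | cons x xs =>
        have hx : ¬ PySem.Chars.isspace x = true := by
          have := List.head_dropWhile_not PySem.Chars.isspace (l := p) (by simp [hd])
          simpa [hd] using this
        exact absurd (h x (by simp [hd])) hx
    rw [List.dropWhile_eq_nil_iff] at hl
    exact hl
  · intro h
    simp only [PySem.Chars.strip, PySem.Chars.lstrip]
    rw [List.dropWhile_eq_nil_iff.mpr h]
    rfl

theorem pvB_wrap_cons (w : List Char) (ws : List (List Char)) :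
    pvB_wrap (w :: ws)
      = (" * ".toList ++ (pvB_take w ws).1) :: pvB_wrap (pvB_take w ws).2 := by
  rw [pvB_wrap.eq_def]

-- core: A's flush-at-end fold over the remaining words equals B's chunking from `cur`
theorem pvA_fold_eq_wrap (ws : List (List Char)) (lines : List (List Char)) (cur : List Char)
    (hcur : cur ≠ []) (hws : ∀ w ∈ ws, w ≠ []) :
    (if (ws.foldl (pvA_step " * ".toList 97) (lines, cur)).2 ≠ [] then
       (ws.foldl (pvA_step " * ".toList 97) (lines, cur)).1
         ++ [" * ".toList ++ (ws.foldl (pvA_step " * ".toList 97) (lines, cur)).2]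
     else (ws.foldl (pvA_step " * ".toList 97) (lines, cur)).1)
      = lines ++ (" * ".toList ++ (pvB_take cur ws).1) :: pvB_wrap (pvB_take cur ws).2 := by
  induction ws generalizing lines cur with
  | nil => simp [pvB_take, pvB_wrap, hcur]
  | cons w ws ih =>
    have hw : w ≠ [] := hws w (by simp)
    have hws' : ∀ x ∈ ws, x ≠ [] := fun x hx => hws x (by simp [hx])
    by_cases hfit : (cur.length : Int) + 1 + (w.length : Int) ≤ 97
    · have hstep : pvA_step " * ".toList 97 (lines, cur) w = (lines, cur ++ ' ' :: w) := by
        simp [pvA_step, hcur, hfit]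
      rw [List.foldl_cons, hstep, ih lines (cur ++ ' ' :: w) (by simp) hws']
      simp [pvB_take, hfit]
    · have hstep : pvA_step " * ".toList 97 (lines, cur) w
          = (lines ++ [" * ".toList ++ cur], w) := by
        simp [pvA_step, hcur, hfit]
      rw [List.foldl_cons, hstep, ih (lines ++ [" * ".toList ++ cur]) w hw hws']
      simp only [pvB_take, hfit, if_false]
      rw [pvB_wrap_cons]
      simp

-- per-paragraph agreement
theorem pvA_para_eq (lines : List (List Char)) (paragraph : List Char) :
    (if PySem.Chars.strip paragraph = [] then lines ++ [" *".toList]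
     else
       let st := (PySem.Chars.split₀ paragraph).foldl (pvA_step " * ".toList 97)
         (lines, ([] : List Char))
       if st.2 ≠ [] then st.1 ++ [" * ".toList ++ st.2] else st.1)
      = lines ++ (let wd := pvB_wrap (PySem.Chars.split₀ paragraph)
                  if wd = [] then [" *".toList] else wd) := by
  by_cases hb : PySem.Chars.strip paragraph = []
  · have hs : PySem.Chars.split₀ paragraph = [] :=
      (split₀_eq_nil_iff paragraph).mpr ((strip_eq_nil_iff paragraph).mp hb)
    simp [hb, hs, pvB_wrap]
  · have hs : PySem.Chars.split₀ paragraph ≠ [] := by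
      intro h
      exact hb ((strip_eq_nil_iff paragraph).mpr ((split₀_eq_nil_iff paragraph).mp h))
    rw [if_neg hb]
    obtain ⟨w, ws, hws⟩ := List.exists_cons_of_ne_nil hs
    have hne := split₀_mem_ne_nil paragraph
    rw [hws] at hne ⊢
    have hw : w ≠ [] := hne w (by simp)
    have hstep0 : pvA_step " * ".toList 97 (lines, ([] : List Char)) w = (lines, w) := by
      simp [pvA_step]
    simp only [List.foldl_cons, hstep0]
    rw [pvA_fold_eq_wrap ws lines w hw (fun x hx => hne x (by simp [hx]))]
    rw [pvB_wrap_cons]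
    simp

theorem foldl_append_paraB (ps : List (List Char)) (lines : List (List Char))
    (g : List Char → List (List Char)) :
    ps.foldl (fun lines p => lines ++ g p) lines = lines ++ ps.flatMap g := by
  induction ps generalizing lines with
  | nil => simp
  | cons p ps ih => simp [ih, List.flatMap_cons]

-- ===== VERDICT (by name: the statement is the Claim_ definition above) =====
theorem format_summary_as_comment_py_spec : Claim_equal_format_summary_as_comment_py := by
  intro summary _
  unfold Spec_format_summary_as_comment_py format_summary_as_comment_py format_summary_as_comment_py_alt
  simp only []
  have hw : (100 : Int) - ((" * ".toList).length : Int) = 97 := by decide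
  rw [hw]
  congr 1
  have hfun :
      (fun (lines : List (List Char)) (paragraph : List Char) =>
        if PySem.Chars.strip paragraph = [] then lines ++ [" *".toList]
        else
          let st := (PySem.Chars.split₀ paragraph).foldl (pvA_step " * ".toList 97)
            (lines, ([] : List Char))
          if st.2 ≠ [] then st.1 ++ [" * ".toList ++ st.2] else st.1)
      = fun (lines : List (List Char)) (paragraph : List Char) =>
          lines ++ (let wd := pvB_wrap (PySem.Chars.split₀ paragraph)
                    if wd = [] then [" *".toList] else wd) :=
    funext fun lines => funext fun paragraph => pvA_para_eq lines paragraph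
  rw [hfun, foldl_append_paraB _ _ _]
  simp
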